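-- pv_equiv track=rewrite | github.com/bpwhelan/GameSentenceMiner | GameSentenceMiner/obs/launch.py | sort_video_sources_by_preference
-- ===== SOURCE A (Python) =====
-- from typing import Dict, List, Optional
--
-- VIDEO_SOURCE_KINDS = {"window_capture", "game_capture", "monitor_capture"}
--
-- VIDEO_SOURCE_PRIORITY = {
--     "game_capture": 0,
--     "window_capture": 1,
--     "monitor_capture": 2,
-- }
--
-- def get_video_source_priority(input_kind: Optional[str]) -> int:
--     return VIDEO_SOURCE_PRIORITY.get(str(input_kind or ""), 999)
--
-- def sort_video_sources_by_preference(
--     scene_items: List[dict],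
--     input_active_by_name: Optional[Dict[str, bool]] = None,
--     input_show_by_name: Optional[Dict[str, bool]] = None,
-- ) -> List[dict]:
--     if not scene_items:
--         return []
--     video_sources = [item for item in scene_items if item.get("inputKind") in VIDEO_SOURCE_KINDS]
--     if not video_sources:
--         return list(scene_items)
--
--     def sort_key(item: dict):
--         source_name = item.get("sourceName")
--         active_state = input_active_by_name.get(source_name) if input_active_by_name else None
--         show_state = input_show_by_name.get(source_name) if input_show_by_name else None
--         explicitly_inactive = active_state is False or show_state is False
--         return (
--             1 if explicitly_inactive else 0,
--             get_video_source_priority(item.get("inputKind")),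
--         )
--
--     return sorted(video_sources, key=sort_key)
-- ===== SOURCE B (Python) =====
-- from typing import Dict, List, Optional
--
-- VIDEO_SOURCE_KINDS = {"window_capture", "game_capture", "monitor_capture"}
--
-- VIDEO_SOURCE_PRIORITY = {
--     "game_capture": 0,
--     "window_capture": 1,
--     "monitor_capture": 2,
-- }
--
-- def get_video_source_priority(input_kind: Optional[str]) -> int:
--     return VIDEO_SOURCE_PRIORITY.get(str(input_kind or ""), 999)
--
-- def sort_video_sources_by_preference(
--     scene_items: List[dict],
--     input_active_by_name: Optional[Dict[str, bool]] = None,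
--     input_show_by_name: Optional[Dict[str, bool]] = None,
-- ) -> List[dict]:
--     if not scene_items:
--         return []
--     video_sources = [item for item in scene_items if item.get("inputKind") in VIDEO_SOURCE_KINDS]
--     if not video_sources:
--         return list(scene_items)
--
--     def bucket_index(item: dict) -> int:
--         name = item.get("sourceName")
--         active = input_active_by_name.get(name) if input_active_by_name else None
--         show = input_show_by_name.get(name) if input_show_by_name else None
--         flag = 1 if (active is False or show is False) else 0
--         return 3 * flag + get_video_source_priority(item.get("inputKind"))
--
--     # one linear pass into 6 buckets (2 activity states x 3 kind priorities);
--     # appending in traversal order reproduces sorted()'s stability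
--     buckets = [[] for _ in range(6)]
--     for item in video_sources:
--         buckets[bucket_index(item)].append(item)
--     out = []
--     for bucket in buckets:
--         out.extend(bucket)
--     return out
-- ===== Notes on version B (the rewrite author's own statement) =====
-- stated objective: alternative
-- what changed: Replaces sorted() with a comparison key by a single-pass counting/bucket sort: each video source is appended to one of six buckets indexed by (explicitly-inactive flag, kind priority), and the buckets are concatenated in ascending key order, which reproduces sorted()'s stable order.
import Mathlib
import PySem

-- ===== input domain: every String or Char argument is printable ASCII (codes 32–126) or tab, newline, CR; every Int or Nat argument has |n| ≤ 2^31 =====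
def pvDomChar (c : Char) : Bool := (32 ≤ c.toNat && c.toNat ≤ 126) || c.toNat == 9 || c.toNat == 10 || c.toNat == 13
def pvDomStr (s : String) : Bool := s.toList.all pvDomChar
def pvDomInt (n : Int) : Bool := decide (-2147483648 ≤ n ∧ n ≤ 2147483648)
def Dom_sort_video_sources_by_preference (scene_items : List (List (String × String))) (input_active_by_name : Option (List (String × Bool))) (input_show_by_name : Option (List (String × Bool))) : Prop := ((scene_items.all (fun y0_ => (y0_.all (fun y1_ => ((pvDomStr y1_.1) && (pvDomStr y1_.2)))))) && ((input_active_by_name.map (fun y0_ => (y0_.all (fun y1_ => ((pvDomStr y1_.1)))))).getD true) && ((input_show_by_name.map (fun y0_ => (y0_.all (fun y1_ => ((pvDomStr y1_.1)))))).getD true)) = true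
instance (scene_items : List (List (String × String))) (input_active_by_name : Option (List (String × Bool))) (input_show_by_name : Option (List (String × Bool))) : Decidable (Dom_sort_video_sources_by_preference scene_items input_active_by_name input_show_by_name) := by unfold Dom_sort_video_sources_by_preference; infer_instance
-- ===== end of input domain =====

-- B replaces sorted() with a single-pass bucket sort over the 6 possible (inactive, priority) keys (objective: alternative).

-- ===== PORT A =====
-- module constant VIDEO_SOURCE_KINDS (a set of three strings)
def pvKinds : List String := ["window_capture", "game_capture", "monitor_capture"]
-- module constant VIDEO_SOURCE_PRIORITY
def pvPrio : PySem.Dict String Int :=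
  PySem.Dict.ofList [("game_capture", 0), ("window_capture", 1), ("monitor_capture", 2)]
-- module helper get_video_source_priority: PRIORITY.get(str(input_kind or ""), 999)
def get_video_source_priority (input_kind : Option String) : Int :=
  pvPrio.getD (input_kind.getD "") 999
-- item.get("inputKind") in VIDEO_SOURCE_KINDS  (None is in no set)
def pvIsVideo (item : List (String × String)) : Bool :=
  match (PySem.Dict.ofList item).get? "inputKind" with
  | some k => pvKinds.contains k
  | none => false
-- d.get(name) if d else None  (None and the empty dict are falsy; .get(None) finds no str key)
def pvLookup (d : Option (List (String × Bool))) (name : Option String) : Option Bool :=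
  match d with
  | some l => if l = [] then none
              else match name with
                   | some s => (PySem.Dict.ofList l).get? s
                   | none => none
  | none => none
-- first component of A's sort_key: 1 if explicitly_inactive else 0
def pvK1 (input_active_by_name input_show_by_name : Option (List (String × Bool)))
    (item : List (String × String)) : Int :=
  let source_name := (PySem.Dict.ofList item).get? "sourceName"
  let active_state := pvLookup input_active_by_name source_name
  let show_state := pvLookup input_show_by_name source_name
  if active_state = some false ∨ show_state = some false then 1 else 0
-- second component of A's sort_key
def pvK2 (item : List (String × String)) : Int :=
  get_video_source_priority ((PySem.Dict.ofList item).get? "inputKind")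

def sort_video_sources_by_preference (scene_items : List (List (String × String))) (input_active_by_name : Option (List (String × Bool))) (input_show_by_name : Option (List (String × Bool))) : List (List (String × String)) :=
  if scene_items = [] then []
  else
    let video_sources := scene_items.filter pvIsVideo
    if video_sources = [] then scene_items
    else
      PySem.List.sorted2 video_sources (pvK1 input_active_by_name input_show_by_name) pvK2

-- ===== PORT B =====
-- B's nested bucket_index: 3 * explicitly_inactive + priority ∈ 0..5 for every video source
def pvBucketIndex (input_active_by_name input_show_by_name : Option (List (String × Bool)))
    (item : List (String × String)) : Int :=
  let name := (PySem.Dict.ofList item).get? "sourceName"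
  let active := pvLookup input_active_by_name name
  let shw := pvLookup input_show_by_name name
  let flag : Int := if active = some false ∨ shw = some false then 1 else 0
  3 * flag + get_video_source_priority ((PySem.Dict.ofList item).get? "inputKind")

-- the six buckets, appended to in traversal order
def pvStep (input_active_by_name input_show_by_name : Option (List (String × Bool)))
    (b : List (List (String × String)) × List (List (String × String)) × List (List (String × String)) ×
         List (List (String × String)) × List (List (String × String)) × List (List (String × String)))
    (item : List (String × String)) :
    List (List (String × String)) × List (List (String × String)) × List (List (String × String)) ×
    List (List (String × String)) × List (List (String × String)) × List (List (String × String)) :=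
  let idx := pvBucketIndex input_active_by_name input_show_by_name item
  match b with
  | (b0, b1, b2, b3, b4, b5) =>
    if idx = 0 then (b0 ++ [item], b1, b2, b3, b4, b5)
    else if idx = 1 then (b0, b1 ++ [item], b2, b3, b4, b5)
    else if idx = 2 then (b0, b1, b2 ++ [item], b3, b4, b5)
    else if idx = 3 then (b0, b1, b2, b3 ++ [item], b4, b5)
    else if idx = 4 then (b0, b1, b2, b3, b4 ++ [item], b5)
    else (b0, b1, b2, b3, b4, b5 ++ [item])

def sort_video_sources_by_preference_alt (scene_items : List (List (String × String))) (input_active_by_name : Option (List (String × Bool))) (input_show_by_name : Option (List (String × Bool))) : List (List (String × String)) :=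
  if scene_items = [] then []
  else
    let video_sources := scene_items.filter pvIsVideo
    if video_sources = [] then scene_items
    else
      match video_sources.foldl (pvStep input_active_by_name input_show_by_name) ([], [], [], [], [], []) with
      | (b0, b1, b2, b3, b4, b5) => b0 ++ b1 ++ b2 ++ b3 ++ b4 ++ b5

-- ===== PRECONDITION & SPEC =====
def Spec_sort_video_sources_by_preference (scene_items : List (List (String × String))) (input_active_by_name : Option (List (String × Bool))) (input_show_by_name : Option (List (String × Bool))) (out : List (List (String × String))) : Prop := out = sort_video_sources_by_preference_alt scene_items input_active_by_name input_show_by_name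
instance (scene_items : List (List (String × String))) (input_active_by_name : Option (List (String × Bool))) (input_show_by_name : Option (List (String × Bool))) (out : List (List (String × String))) : Decidable (Spec_sort_video_sources_by_preference scene_items input_active_by_name input_show_by_name out) := by unfold Spec_sort_video_sources_by_preference; infer_instance

-- ===== CLAIM (what is proved, stated in full; the proofs are below) =====
def Claim_equal_sort_video_sources_by_preference : Prop := ∀ (scene_items : List (List (String × String))) (input_active_by_name : Option (List (String × Bool))) (input_show_by_name : Option (List (String × Bool))), Dom_sort_video_sources_by_preference scene_items input_active_by_name input_show_by_name → Spec_sort_video_sources_by_preference scene_items input_active_by_name input_show_by_name (sort_video_sources_by_preference scene_items input_active_by_name input_show_by_name)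

-- ===== LEMMAS AND PROOFS =====

-- Python's lexicographic tuple comparison on (Int, Int), as sorted2 uses it
def pvLexLt (p q : Int × Int) : Bool :=
  decide (p.1 < q.1) || (!decide (q.1 < p.1) && decide (p.2 < q.2))

theorem pvLexLt_irrefl (p : Int × Int) : pvLexLt p p = false := by
  simp [pvLexLt]

theorem pvLexLt_asymm {p q : Int × Int} (h : pvLexLt p q = true) : pvLexLt q p = false := by
  rcases p with ⟨a, b⟩; rcases q with ⟨c, d⟩
  simp only [pvLexLt, Bool.or_eq_true, Bool.and_eq_true, Bool.not_eq_true',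
    decide_eq_true_eq, decide_eq_false_iff_not, Bool.or_eq_false_iff, Bool.and_eq_false_iff,
    Bool.not_eq_false', decide_eq_false_iff_not, decide_eq_true_eq] at h ⊢
  omega

theorem pvLexLt_ne {p q : Int × Int} (h : pvLexLt p q = true) : p ≠ q := by
  intro he; subst he; simp [pvLexLt_irrefl] at h

-- the buckets of keys, as filters
def pvF {α : Type} (key : α → Int × Int) (ks : List (Int × Int)) (zs : List α) : List α :=
  ks.flatMap (fun v => zs.filter (fun z => key z == v))

theorem mem_pvF {α : Type} {key : α → Int × Int} {ks : List (Int × Int)} {zs : List α}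
    {c : α} (h : c ∈ pvF key ks zs) : key c ∈ ks := by
  simp only [pvF, List.mem_flatMap, List.mem_filter, beq_iff_eq] at h
  obtain ⟨v, hv, _, he⟩ := h
  exact he ▸ hv

theorem insertBy_pass {α : Type} (before : α → α → Bool) (x : α) (l m : List α)
    (h : ∀ a ∈ l, before x a = false) :
    PySem.List.insertBy before x (l ++ m) = l ++ PySem.List.insertBy before x m := by
  induction l with
  | nil => simp
  | cons a t ih =>
    simp only [List.cons_append, PySem.List.insertBy, h a (by simp)]
    simp only [Bool.false_eq_true, if_false, List.cons.injEq, true_and]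
    exact ih (fun a ha => h a (by simp [ha]))

theorem insertBy_head {α : Type} (before : α → α → Bool) (x : α) (m : List α)
    (h : ∀ a ∈ m, before x a = true) :
    PySem.List.insertBy before x m = x :: m := by
  cases m with
  | nil => rfl
  | cons a t => simp [PySem.List.insertBy, h a (by simp)]

theorem insertBy_bucket {α : Type} (key : α → Int × Int) (x : α) (ks : List (Int × Int))
    (hks : List.Pairwise (fun p q => pvLexLt p q = true) ks) (hx : key x ∈ ks) (zs : List α) :
    PySem.List.insertBy (fun a b => pvLexLt (key a) (key b)) x (pvF key ks zs)
      = pvF key ks (zs ++ [x]) := by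
  induction ks with
  | nil => simp at hx
  | cons v ks ih =>
    have hpw := List.pairwise_cons.mp hks
    have hcons : ∀ ws, pvF key (v :: ks) ws
        = ws.filter (fun z => key z == v) ++ pvF key ks ws := by
      intro ws; simp [pvF]
    by_cases hkv : key x = v
    · have h1 : ∀ a ∈ zs.filter (fun z => key z == v), pvLexLt (key x) (key a) = false := by
        intro a ha
        have : key a = v := by simpa using (List.mem_filter.mp ha).2
        rw [this, hkv]; exact pvLexLt_irrefl v
      have h2 : ∀ a ∈ pvF key ks zs, pvLexLt (key x) (key a) = true := by
        intro a ha
        rw [hkv]; exact hpw.1 _ (mem_pvF ha)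
      have hne : ∀ w ∈ ks, key x ≠ w := by
        intro w hw he
        exact pvLexLt_ne (hpw.1 w hw) (hkv.symm.trans he)
      have hF : pvF key ks (zs ++ [x]) = pvF key ks zs := by
        simp only [pvF]
        refine List.flatMap_congr ?_
        intro w hw
        simp [List.filter_append, beq_iff_eq, hne w hw]
      rw [hcons zs, insertBy_pass _ x _ _ h1, insertBy_head _ x _ h2, hcons (zs ++ [x]), hF]
      simp [List.filter_append, hkv]
    · have hx' : key x ∈ ks := by
        rcases List.mem_cons.mp hx with h | h
        · exact absurd h hkv
        · exact h
      have hvx : pvLexLt v (key x) = true := hpw.1 _ hx'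
      have h1 : ∀ a ∈ zs.filter (fun z => key z == v), pvLexLt (key x) (key a) = false := by
        intro a ha
        have : key a = v := by simpa using (List.mem_filter.mp ha).2
        rw [this]; exact pvLexLt_asymm hvx
      have hnv : key x ≠ v := fun he => pvLexLt_ne hvx he.symm
      rw [hcons zs, insertBy_pass _ x _ _ h1, ih hpw.2 hx', hcons (zs ++ [x])]
      simp [List.filter_append, beq_iff_eq, hnv]

theorem foldl_insertBy_pvF {α : Type} (key : α → Int × Int) (ks : List (Int × Int))
    (hks : List.Pairwise (fun p q => pvLexLt p q = true) ks) :
    ∀ (xs zs : List α), (∀ x ∈ xs, key x ∈ ks) →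
    xs.foldl (fun acc x => PySem.List.insertBy (fun a b => pvLexLt (key a) (key b)) x acc) (pvF key ks zs)
      = pvF key ks (zs ++ xs) := by
  intro xs
  induction xs with
  | nil => intro zs _; simp
  | cons x t ih =>
    intro zs hx
    simp only [List.foldl_cons]
    rw [insertBy_bucket key x ks hks (hx x (by simp)) zs]
    rw [ih (zs ++ [x]) (fun y hy => hx y (by simp [hy]))]
    simp


-- the six possible sort keys, in ascending lexicographic order
def pvKs : List (Int × Int) := [(0, 0), (0, 1), (0, 2), (1, 0), (1, 1), (1, 2)]

theorem pvKs_pairwise : List.Pairwise (fun p q => pvLexLt p q = true) pvKs := by decide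

theorem pvK1_cases (act shw : Option (List (String × Bool))) (item : List (String × String)) :
    pvK1 act shw item = 0 ∨ pvK1 act shw item = 1 := by
  unfold pvK1; dsimp only; split <;> simp

theorem pvK2_cases (item : List (String × String)) (h : pvIsVideo item = true) :
    pvK2 item = 0 ∨ pvK2 item = 1 ∨ pvK2 item = 2 := by
  unfold pvIsVideo at h
  rcases hg : (PySem.Dict.ofList item).get? "inputKind" with _ | k <;> rw [hg] at h
  · simp at h
  · simp only [pvKinds, List.contains_eq_mem, List.mem_cons, List.not_mem_nil, or_false,
      decide_eq_true_eq] at h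
    unfold pvK2
    rw [hg]
    rcases h with h | h | h <;> subst h <;> decide

theorem key_mem_pvKs (act shw : Option (List (String × Bool))) (item : List (String × String))
    (h : pvIsVideo item = true) : (pvK1 act shw item, pvK2 item) ∈ pvKs := by
  rcases pvK1_cases act shw item with h1 | h1 <;>
    rcases pvK2_cases item h with h2 | h2 | h2 <;>
      simp [pvKs, h1, h2]

theorem pvBucketIndex_eq (act shw : Option (List (String × Bool))) (item : List (String × String)) :
    pvBucketIndex act shw item = 3 * pvK1 act shw item + pvK2 item := rfl

theorem sorted2_eq_foldl (xs : List (List (String × String)))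
    (k1 k2 : List (String × String) → Int) :
    PySem.List.sorted2 xs k1 k2 false
      = xs.foldl (fun acc x =>
          PySem.List.insertBy (fun a b => pvLexLt (k1 a, k2 a) (k1 b, k2 b)) x acc) [] := rfl

-- B's fold maintains: each bucket is the filter of the processed prefix by its index
theorem foldl_pvStep (act shw : Option (List (String × Bool)))
    (xs : List (List (String × String))) (hx : ∀ x ∈ xs, pvIsVideo x = true) :
    ∀ zs : List (List (String × String)),
    xs.foldl (pvStep act shw)
        (zs.filter (fun z => decide (pvBucketIndex act shw z = 0)),
         zs.filter (fun z => decide (pvBucketIndex act shw z = 1)),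
         zs.filter (fun z => decide (pvBucketIndex act shw z = 2)),
         zs.filter (fun z => decide (pvBucketIndex act shw z = 3)),
         zs.filter (fun z => decide (pvBucketIndex act shw z = 4)),
         zs.filter (fun z => decide (pvBucketIndex act shw z = 5)))
      = ((zs ++ xs).filter (fun z => decide (pvBucketIndex act shw z = 0)),
         (zs ++ xs).filter (fun z => decide (pvBucketIndex act shw z = 1)),
         (zs ++ xs).filter (fun z => decide (pvBucketIndex act shw z = 2)),
         (zs ++ xs).filter (fun z => decide (pvBucketIndex act shw z = 3)),
         (zs ++ xs).filter (fun z => decide (pvBucketIndex act shw z = 4)),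
         (zs ++ xs).filter (fun z => decide (pvBucketIndex act shw z = 5))) := by
  induction xs with
  | nil => intro zs; simp
  | cons x t ih =>
    intro zs
    have hxv : pvIsVideo x = true := hx x (by simp)
    have hidx : pvBucketIndex act shw x = 0 ∨ pvBucketIndex act shw x = 1 ∨
        pvBucketIndex act shw x = 2 ∨ pvBucketIndex act shw x = 3 ∨
        pvBucketIndex act shw x = 4 ∨ pvBucketIndex act shw x = 5 := by
      rw [pvBucketIndex_eq]
      rcases pvK1_cases act shw x with h1 | h1 <;>
        rcases pvK2_cases x hxv with h2 | h2 | h2 <;> rw [h1, h2] <;> norm_num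
    have hstep : pvStep act shw
        (zs.filter (fun z => decide (pvBucketIndex act shw z = 0)),
         zs.filter (fun z => decide (pvBucketIndex act shw z = 1)),
         zs.filter (fun z => decide (pvBucketIndex act shw z = 2)),
         zs.filter (fun z => decide (pvBucketIndex act shw z = 3)),
         zs.filter (fun z => decide (pvBucketIndex act shw z = 4)),
         zs.filter (fun z => decide (pvBucketIndex act shw z = 5))) x
      = ((zs ++ [x]).filter (fun z => decide (pvBucketIndex act shw z = 0)),
         (zs ++ [x]).filter (fun z => decide (pvBucketIndex act shw z = 1)),
         (zs ++ [x]).filter (fun z => decide (pvBucketIndex act shw z = 2)),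
         (zs ++ [x]).filter (fun z => decide (pvBucketIndex act shw z = 3)),
         (zs ++ [x]).filter (fun z => decide (pvBucketIndex act shw z = 4)),
         (zs ++ [x]).filter (fun z => decide (pvBucketIndex act shw z = 5))) := by
      rcases hidx with h | h | h | h | h | h <;>
        simp [pvStep, h, List.filter_append]
    rw [List.foldl_cons, hstep, ih (fun y hy => hx y (by simp [hy])) (zs ++ [x])]
    simp
theorem bucket_filter_eq (act shw : Option (List (String × Bool)))
    (vs : List (List (String × String))) (hvs : ∀ x ∈ vs, pvIsVideo x = true)
    (j : Int) (v : Int × Int) (hjv : v.1 * 3 + v.2 = j)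
    (hv2 : v.2 = 0 ∨ v.2 = 1 ∨ v.2 = 2) :
    vs.filter (fun z => decide (pvBucketIndex act shw z = j))
      = vs.filter (fun z => (pvK1 act shw z, pvK2 z) == v) := by
  apply List.filter_congr
  intro x hx
  have h1 := pvK1_cases act shw x
  have h2 := pvK2_cases x (hvs x hx)
  rw [pvBucketIndex_eq]
  rw [Bool.eq_iff_iff]
  simp only [decide_eq_true_eq, beq_iff_eq, Prod.ext_iff]
  omega

-- ===== VERDICT (by name: the statement is the Claim_ definition above) =====
theorem sort_video_sources_by_preference_spec : Claim_equal_sort_video_sources_by_preference := by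
  unfold Claim_equal_sort_video_sources_by_preference
  intro si act shw _
  unfold Spec_sort_video_sources_by_preference
  unfold sort_video_sources_by_preference sort_video_sources_by_preference_alt
  by_cases h1 : si = []
  · simp [h1]
  · simp only [h1, if_false]
    by_cases h2 : si.filter pvIsVideo = []
    · simp [h2]
    · simp only [h2, if_false]
      have hvs : ∀ x ∈ si.filter pvIsVideo, pvIsVideo x = true :=
        fun x hx => (List.mem_filter.mp hx).2
      -- A's sorted2 is the bucket concatenation pvF
      have hA : PySem.List.sorted2 (si.filter pvIsVideo) (pvK1 act shw) pvK2 false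
          = pvF (fun z => (pvK1 act shw z, pvK2 z)) pvKs (si.filter pvIsVideo) := by
        rw [sorted2_eq_foldl]
        have h0 : pvF (fun z => (pvK1 act shw z, pvK2 z)) pvKs ([] : List (List (String × String))) = [] := by
          simp [pvF]
        rw [← h0, foldl_insertBy_pvF _ pvKs pvKs_pairwise _ []
          (fun x hx => key_mem_pvKs act shw x (hvs x hx))]
        simp
      -- B's fold fills each bucket with the corresponding filter
      have hB := foldl_pvStep act shw (si.filter pvIsVideo) hvs []
      simp only [List.filter_nil, List.nil_append] at hB
      rw [hA, hB]
      rw [bucket_filter_eq act shw _ hvs 0 (0, 0) (by norm_num) (by norm_num),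
          bucket_filter_eq act shw _ hvs 1 (0, 1) (by norm_num) (by norm_num),
          bucket_filter_eq act shw _ hvs 2 (0, 2) (by norm_num) (by norm_num),
          bucket_filter_eq act shw _ hvs 3 (1, 0) (by norm_num) (by norm_num),
          bucket_filter_eq act shw _ hvs 4 (1, 1) (by norm_num) (by norm_num),
          bucket_filter_eq act shw _ hvs 5 (1, 2) (by norm_num) (by norm_num)]
      simp [pvF, pvKs]
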